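-- pv_equiv track=rewrite | github.com/neo-claw/dashboard | trinity/experiments/loom-env/lib/python3.12/site-packages/loom/workshop/config_impact.py | _find_downstream
-- ===== SOURCE A (Python) =====
-- def _find_downstream(
--     source_stages: set[str],
--     deps: dict[str, set[str]],
-- ) -> set[str]:
--     """Find all stages transitively downstream of the given source stages.
--
--     A stage is downstream if it depends (directly or transitively) on any
--     of the source stages.
--     """
--     # Build reverse adjacency: stage -> set of stages that depend on it.
--     dependents: dict[str, set[str]] = {}
--     for stage, dep_set in deps.items():
--         for dep in dep_set:
--             dependents.setdefault(dep, set()).add(stage)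
--
--     # BFS from source stages through dependents.
--     visited: set[str] = set()
--     queue = list(source_stages)
--
--     while queue:
--         current = queue.pop(0)
--         for dependent in dependents.get(current, set()):
--             if dependent not in visited and dependent not in source_stages:
--                 visited.add(dependent)
--                 queue.append(dependent)
--
--     return visited
-- ===== SOURCE B (Python) =====
-- def _find_downstream(
--     source_stages: set[str],
--     deps: dict[str, set[str]],
-- ) -> set[str]:
--     """Fixpoint closure by repeated scanning of deps (no reverse-adjacency map)."""
--     downstream: set[str] = set()
--     changed = True
--     while changed:
--         changed = False
--         for stage, dep_set in deps.items():
--             if (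
--                 stage not in source_stages
--                 and stage not in downstream
--                 and (dep_set & (source_stages | downstream))
--             ):
--                 downstream.add(stage)
--                 changed = True
--     return downstream
-- ===== Notes on version B (the rewrite author's own statement) =====
-- stated objective: alternative
-- what changed: Replaces A's reverse-adjacency map plus BFS queue by a fixpoint closure: repeatedly rescan deps, adding any non-source stage whose dependency set meets sources-or-downstream, until a full pass adds nothing.
import Mathlib
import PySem

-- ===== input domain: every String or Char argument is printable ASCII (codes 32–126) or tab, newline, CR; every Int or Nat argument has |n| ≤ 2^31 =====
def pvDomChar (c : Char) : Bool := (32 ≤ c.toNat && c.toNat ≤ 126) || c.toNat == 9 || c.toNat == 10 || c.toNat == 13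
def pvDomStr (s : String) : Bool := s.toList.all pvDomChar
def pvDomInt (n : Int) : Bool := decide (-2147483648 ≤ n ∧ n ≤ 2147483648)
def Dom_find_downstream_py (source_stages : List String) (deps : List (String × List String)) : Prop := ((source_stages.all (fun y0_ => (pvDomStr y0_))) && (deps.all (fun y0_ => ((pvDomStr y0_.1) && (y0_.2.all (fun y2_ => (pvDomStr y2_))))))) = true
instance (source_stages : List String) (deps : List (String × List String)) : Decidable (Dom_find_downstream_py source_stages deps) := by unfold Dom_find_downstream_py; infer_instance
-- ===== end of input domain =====

-- B replaces A's reverse-adjacency map + BFS by a fixpoint closure that rescans deps until no pass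
-- adds a stage (objective: alternative). Both Pythons return a set; each port returns the set's
-- elements in canonical sorted order (a Python set carries no order).

-- ===== PORT A =====
-- dependents: dict stage -> set of stages that depend on it (the two nested 'for' loops)
def pvDependents (deps : List (String × List String)) : PySem.Dict String (PySem.Set String) :=
  deps.foldl (fun dependents p =>
    p.2.foldl (fun dependents dep =>
      dependents.insert dep (PySem.Set.add (dependents.getD dep PySem.Set.empty) p.1)) dependents)
    PySem.Dict.empty

-- the body of one 'while' iteration: the 'for dependent in dependents.get(current, set())' loop
def pvBfsInner (sources : List String) (qv : List String × PySem.Set String) (l : List String) :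
    List String × PySem.Set String :=
  l.foldl (fun st dependent =>
    if !(PySem.Set.contains st.2 dependent) && !(PySem.Set.contains sources dependent)
    then (st.1 ++ [dependent], PySem.Set.add st.2 dependent) else st) qv

-- the 'while queue' loop; fuel is only a termination guard (proved sufficient below)
def pvBfsA (dependents : PySem.Dict String (PySem.Set String)) (sources : List String) :
    Nat → List String → PySem.Set String → PySem.Set String
  | 0, _, visited => visited
  | _ + 1, [], visited => visited
  | fuel + 1, current :: rest, visited =>
    let st := pvBfsInner sources (rest, visited) (dependents.getD current PySem.Set.empty)
    pvBfsA dependents sources fuel st.1 st.2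

def find_downstream_py (source_stages : List String) (deps : List (String × List String)) : List String :=
  let dependents := pvDependents deps
  let visited := pvBfsA dependents source_stages
    (source_stages.length + 2 * deps.length) source_stages PySem.Set.empty
  PySem.List.sorted visited (fun x => x) false

-- ===== PORT B =====
-- one step of the 'for stage, dep_set in deps.items()' scan
def pvPassF (sources : List String) (acc : PySem.Set String × Bool) (p : String × List String) :
    PySem.Set String × Bool :=
  if !(PySem.Set.contains sources p.1) && !(PySem.Set.contains acc.1 p.1)
      && p.2.any (fun y => PySem.Set.contains sources y || PySem.Set.contains acc.1 y)
  then (PySem.Set.add acc.1 p.1, true) else acc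

-- one full pass over deps ('changed' starts False each pass)
def pvPass (sources : List String) (deps : List (String × List String))
    (down : PySem.Set String) : PySem.Set String × Bool :=
  deps.foldl (pvPassF sources) (down, false)

-- the 'while changed' loop; fuel is only a termination guard (proved sufficient below)
def pvLoopB (sources : List String) (deps : List (String × List String)) :
    Nat → PySem.Set String → PySem.Set String
  | 0, down => down
  | fuel + 1, down =>
    let r := pvPass sources deps down
    if r.2 then pvLoopB sources deps fuel r.1 else r.1

def find_downstream_py_alt (source_stages : List String) (deps : List (String × List String)) : List String :=
  PySem.List.sorted (pvLoopB source_stages deps (deps.length + 1) PySem.Set.empty) (fun x => x) false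

-- ===== PRECONDITION & SPEC =====
def Spec_find_downstream_py (source_stages : List String) (deps : List (String × List String)) (out : List String) : Prop := out = find_downstream_py_alt source_stages deps
instance (source_stages : List String) (deps : List (String × List String)) (out : List String) : Decidable (Spec_find_downstream_py source_stages deps out) := by unfold Spec_find_downstream_py; infer_instance

-- ===== CLAIM (what is proved, stated in full; the proofs are below) =====
def Claim_equal_find_downstream_py : Prop := ∀ (source_stages : List String) (deps : List (String × List String)), Dom_find_downstream_py source_stages deps → Spec_find_downstream_py source_stages deps (find_downstream_py source_stages deps)

-- ===== LEMMAS AND PROOFS =====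

-- x is transitively downstream of sources: it owns an entry of deps, is not a source, and one of
-- its deps is a source or is itself downstream.
inductive pvReach (sources : List String) (deps : List (String × List String)) : String → Prop
  | base (stage : String) (ds : List String) (y : String) (hmem : (stage, ds) ∈ deps)
      (hns : stage ∉ sources) (hy : y ∈ ds) (hsrc : y ∈ sources) : pvReach sources deps stage
  | step (stage : String) (ds : List String) (y : String) (hmem : (stage, ds) ∈ deps)
      (hns : stage ∉ sources) (hy : y ∈ ds) (hpre : pvReach sources deps y) :
      pvReach sources deps stage

lemma pv_len_le {l m : List String} (h : l.Nodup) (hs : ∀ x ∈ l, x ∈ m) : l.length ≤ m.length := by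
  calc l.length = l.toFinset.card := (List.toFinset_card_of_nodup h).symm
    _ ≤ m.toFinset.card := Finset.card_le_card (by
        intro x hx
        simp only [List.mem_toFinset] at *
        exact hs x hx)
    _ ≤ m.length := m.toFinset_card_le

lemma pv_getD_inner (st : String) :
    ∀ (l : List String) (d : PySem.Dict String (PySem.Set String)) (x y : String),
      (y ∈ (l.foldl (fun d dep =>
          d.insert dep (PySem.Set.add (d.getD dep PySem.Set.empty) st)) d).getD x PySem.Set.empty
        ↔ y ∈ d.getD x PySem.Set.empty ∨ (x ∈ l ∧ y = st)) := by
  intro l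
  induction l with
  | nil => intro d x y; simp
  | cons a l ih =>
    intro d x y
    rw [List.foldl_cons, ih]
    by_cases hxa : x = a
    · subst hxa
      simp [PySem.Set.mem_add]
      tauto
    · simp [PySem.Dict.getD_insert, hxa]

lemma pv_mem_dependents (deps : List (String × List String)) (x y : String) :
    y ∈ (pvDependents deps).getD x PySem.Set.empty ↔ ∃ p ∈ deps, p.1 = y ∧ x ∈ p.2 := by
  have aux : ∀ (l : List (String × List String)) (d : PySem.Dict String (PySem.Set String)),
      (y ∈ (l.foldl (fun dependents p =>
          p.2.foldl (fun dd dep =>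
            dd.insert dep (PySem.Set.add (dd.getD dep PySem.Set.empty) p.1)) dependents) d).getD x
          PySem.Set.empty
        ↔ y ∈ d.getD x PySem.Set.empty ∨ ∃ p ∈ l, p.1 = y ∧ x ∈ p.2) := by
    intro l
    induction l with
    | nil => intro d; simp
    | cons p l ih =>
      intro d
      rw [List.foldl_cons, ih, pv_getD_inner]
      simp only [List.mem_cons]
      constructor
      · rintro ((h | ⟨hx, rfl⟩) | ⟨q, hq, h1, h2⟩)
        · exact Or.inl h
        · exact Or.inr ⟨p, Or.inl rfl, rfl, hx⟩
        · exact Or.inr ⟨q, Or.inr hq, h1, h2⟩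
      · rintro (h | ⟨q, (rfl | hq), h1, h2⟩)
        · exact Or.inl (Or.inl h)
        · exact Or.inl (Or.inr ⟨h2, h1.symm⟩)
        · exact Or.inr ⟨q, hq, h1, h2⟩
  rw [pvDependents, aux]
  simp [PySem.Dict.getD_empty, PySem.Set.empty]

lemma pv_dep_keys (deps : List (String × List String)) {x y : String}
    (h : y ∈ (pvDependents deps).getD x PySem.Set.empty) : y ∈ deps.map Prod.fst := by
  rcases (pv_mem_dependents deps x y).1 h with ⟨p, hp, h1, _⟩
  exact h1 ▸ List.mem_map_of_mem hp

lemma pv_bfsInner_spec (sources : List String) :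
    ∀ (l q v : List String), v.Nodup →
      ∃ new : List String,
        pvBfsInner sources (q, v) l = (q ++ new, v ++ new) ∧ (v ++ new).Nodup ∧
        (∀ x ∈ new, x ∈ l ∧ x ∉ sources ∧ x ∉ v) ∧
        (∀ x ∈ l, x ∉ sources → x ∈ v ++ new) := by
  intro l
  induction l with
  | nil =>
    intro q v hv
    exact ⟨[], by simp [pvBfsInner], by simpa, by simp, by simp⟩
  | cons a l ih =>
    intro q v hv
    by_cases hmem : a ∈ v ∨ a ∈ sources
    · have hstep : pvBfsInner sources (q, v) (a :: l) = pvBfsInner sources (q, v) l := by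
        simp only [pvBfsInner, List.foldl_cons]
        congr 1
        rw [if_neg (by simp only [Bool.and_eq_true, Bool.not_eq_true',
          PySem.Set.contains_eq_listContains]; simp; tauto)]
      rcases ih q v hv with ⟨new, h1, h2, h3, h4⟩
      refine ⟨new, hstep ▸ h1, h2, fun x hx => ⟨List.mem_cons_of_mem _ (h3 x hx).1,
        (h3 x hx).2.1, (h3 x hx).2.2⟩, ?_⟩
      intro x hx hxs
      rcases List.mem_cons.1 hx with rfl | hx'
      · rcases hmem with h | h
        · exact List.mem_append_left _ h
        · exact absurd h hxs
      · exact h4 x hx' hxs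
    · rw [not_or] at hmem
      obtain ⟨hav, has⟩ := hmem
      have hstep : pvBfsInner sources (q, v) (a :: l) =
          pvBfsInner sources (q ++ [a], v ++ [a]) l := by
        simp only [pvBfsInner, List.foldl_cons]
        congr 1
        rw [if_pos (by simp [hav, has])]
        simp [PySem.Set.add_of_not_mem hav]
      have hv' : (v ++ [a]).Nodup := by
        simp [List.nodup_append, hv]
        exact fun b hb hba => hav (hba ▸ hb)
      rcases ih (q ++ [a]) (v ++ [a]) hv' with ⟨new, h1, h2, h3, h4⟩
      refine ⟨a :: new, ?_, ?_, ?_, ?_⟩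
      · rw [hstep, h1]; simp
      · simpa using h2
      · intro x hx
        rcases List.mem_cons.1 hx with rfl | hx'
        · exact ⟨List.mem_cons_self, has, hav⟩
        · have h := h3 x hx'
          exact ⟨List.mem_cons_of_mem _ h.1, h.2.1,
            fun hxv => h.2.2 (List.mem_append_left _ hxv)⟩
      · intro x hx hxs
        rcases List.mem_cons.1 hx with rfl | hx'
        · simp
        · simpa using h4 x hx' hxs

lemma pv_bfsA_main (sources : List String) (deps : List (String × List String)) :
    ∀ (fuel : Nat) (q v : List String), v.Nodup →
      (∀ x ∈ v, x ∈ deps.map Prod.fst) →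
      (∀ x ∈ v, pvReach sources deps x) →
      (∀ c ∈ q, c ∈ sources ∨ c ∈ v) →
      (∀ c, (c ∈ sources ∨ c ∈ v) → c ∈ q ∨
        (∀ d ∈ (pvDependents deps).getD c PySem.Set.empty, d ∉ sources → d ∈ v)) →
      q.length + 2 * (PySem.Set.ofList (deps.map Prod.fst)).length ≤ fuel + 2 * v.length →
      (pvBfsA (pvDependents deps) sources fuel q v).Nodup ∧
      (∀ x ∈ pvBfsA (pvDependents deps) sources fuel q v, pvReach sources deps x) ∧
      (∀ c, (c ∈ sources ∨ c ∈ pvBfsA (pvDependents deps) sources fuel q v) →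
        ∀ d ∈ (pvDependents deps).getD c PySem.Set.empty, d ∉ sources →
          d ∈ pvBfsA (pvDependents deps) sources fuel q v) := by
  intro fuel
  induction fuel with
  | zero =>
    intro q v hnd hkeys hreach hq hcl hfuel
    have hvK : v.length ≤ (PySem.Set.ofList (deps.map Prod.fst)).length :=
      pv_len_le hnd (fun x hx => (PySem.Set.mem_ofList _ _).2 (hkeys x hx))
    have hq0 : q = [] := by
      cases q with
      | nil => rfl
      | cons a t => exfalso; simp only [List.length_cons] at hfuel; omega
    subst hq0
    simp only [pvBfsA]
    refine ⟨hnd, hreach, fun c hc d hd hds => ?_⟩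
    rcases hcl c hc with h | h
    · exact absurd h List.not_mem_nil
    · exact h d hd hds
  | succ fuel ih =>
    intro q v hnd hkeys hreach hq hcl hfuel
    cases q with
    | nil =>
      simp only [pvBfsA]
      refine ⟨hnd, hreach, fun c hc d hd hds => ?_⟩
      rcases hcl c hc with h | h
      · exact absurd h List.not_mem_nil
      · exact h d hd hds
    | cons current rest =>
      rcases pv_bfsInner_spec sources ((pvDependents deps).getD current PySem.Set.empty) rest v hnd
        with ⟨new, h1, h2, h3, h4⟩
      have hres : pvBfsA (pvDependents deps) sources (fuel + 1) (current :: rest) v =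
          pvBfsA (pvDependents deps) sources fuel (rest ++ new) (v ++ new) := by
        simp only [pvBfsA, h1]
      have hcur : current ∈ sources ∨ pvReach sources deps current := by
        rcases hq current List.mem_cons_self with h | h
        · exact Or.inl h
        · exact Or.inr (hreach current h)
      have hkeys' : ∀ x ∈ v ++ new, x ∈ deps.map Prod.fst := by
        intro x hx
        rcases List.mem_append.1 hx with h | h
        · exact hkeys x h
        · exact pv_dep_keys deps (h3 x h).1
      have hreach' : ∀ x ∈ v ++ new, pvReach sources deps x := by
        intro x hx
        rcases List.mem_append.1 hx with h | h
        · exact hreach x h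
        · obtain ⟨hxd, hxs, _⟩ := h3 x h
          rcases (pv_mem_dependents deps current x).1 hxd with ⟨p, hp, hp1, hp2⟩
          obtain ⟨a, b⟩ := p
          simp only at hp1 hp2
          subst hp1
          rcases hcur with h' | h'
          · exact pvReach.base a b current hp hxs hp2 h'
          · exact pvReach.step a b current hp hxs hp2 h'
      have hq' : ∀ c ∈ rest ++ new, c ∈ sources ∨ c ∈ v ++ new := by
        intro c hc
        rcases List.mem_append.1 hc with h | h
        · rcases hq c (List.mem_cons_of_mem _ h) with h' | h'
          · exact Or.inl h'
          · exact Or.inr (List.mem_append_left _ h')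
        · exact Or.inr (List.mem_append_right _ h)
      have hcl' : ∀ c, (c ∈ sources ∨ c ∈ v ++ new) → c ∈ rest ++ new ∨
          (∀ d ∈ (pvDependents deps).getD c PySem.Set.empty, d ∉ sources → d ∈ v ++ new) := by
        intro c hc
        have hc' : (c ∈ sources ∨ c ∈ v) ∨ c ∈ new := by
          rcases hc with h | h
          · exact Or.inl (Or.inl h)
          · rcases List.mem_append.1 h with h' | h'
            · exact Or.inl (Or.inr h')
            · exact Or.inr h'
        rcases hc' with h | h
        · rcases hcl c h with h' | h'
          · rcases List.mem_cons.1 h' with rfl | h''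
            · exact Or.inr (fun d hd hds => h4 d hd hds)
            · exact Or.inl (List.mem_append_left _ h'')
          · exact Or.inr (fun d hd hds => List.mem_append_left _ (h' d hd hds))
        · exact Or.inl (List.mem_append_right _ h)
      have hfuel' : (rest ++ new).length + 2 * (PySem.Set.ofList (deps.map Prod.fst)).length ≤
          fuel + 2 * (v ++ new).length := by
        simp only [List.length_append]
        simp only [List.length_cons] at hfuel
        omega
      rw [hres]
      exact ih (rest ++ new) (v ++ new) h2 hkeys' hreach' hq' hcl' hfuel'

lemma pv_closed_complete_A (sources : List String) (deps : List (String × List String))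
    (R : List String)
    (hcl : ∀ c, (c ∈ sources ∨ c ∈ R) →
      ∀ d ∈ (pvDependents deps).getD c PySem.Set.empty, d ∉ sources → d ∈ R) :
    ∀ x, pvReach sources deps x → x ∈ R := by
  intro x h
  induction h with
  | base stage ds y hmem hns hy hsrc =>
    exact hcl y (Or.inl hsrc)
      stage ((pv_mem_dependents deps y stage).2 ⟨(stage, ds), hmem, rfl, hy⟩) hns
  | step stage ds y hmem hns hy _ ih =>
    exact hcl y (Or.inr ih)
      stage ((pv_mem_dependents deps y stage).2 ⟨(stage, ds), hmem, rfl, hy⟩) hns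

lemma pv_pass_spec (sources : List String) (deps : List (String × List String)) :
    ∀ (l : List (String × List String)) (down : PySem.Set String) (ch : Bool),
      down.Nodup → (∀ p ∈ l, p ∈ deps) →
      ∃ new : List String,
        (l.foldl (pvPassF sources) (down, ch)).1 = down ++ new ∧
        (down ++ new).Nodup ∧
        (∀ x ∈ new, x ∈ l.map Prod.fst ∧ x ∉ sources ∧ x ∉ down) ∧
        ((l.foldl (pvPassF sources) (down, ch)).2 = (ch || !new.isEmpty)) ∧
        ((∀ x ∈ down, pvReach sources deps x) →
          ∀ x ∈ down ++ new, pvReach sources deps x) ∧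
        ((l.foldl (pvPassF sources) (down, ch)).2 = false →
          ∀ p ∈ l, p.1 ∉ sources → (∃ y ∈ p.2, y ∈ sources ∨ y ∈ down) → p.1 ∈ down) := by
  intro l
  induction l with
  | nil =>
    intro down ch hnd _
    refine ⟨[], by simp, by simpa using hnd, by simp, by simp, ?_, by simp⟩
    intro h x hx
    exact h x (by simpa using hx)
  | cons p l ih =>
    obtain ⟨st, ds⟩ := p
    intro down ch hnd hl
    have hl' : ∀ q ∈ l, q ∈ deps := fun q hq => hl q (List.mem_cons_of_mem _ hq)
    have hp : (st, ds) ∈ deps := hl (st, ds) List.mem_cons_self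
    by_cases hcond : st ∉ sources ∧ st ∉ down ∧ ∃ y ∈ ds, y ∈ sources ∨ y ∈ down
    · obtain ⟨hc1, hc2, y, hy, hor⟩ := hcond
      have hstep : List.foldl (pvPassF sources) (down, ch) ((st, ds) :: l) =
          List.foldl (pvPassF sources) (down ++ [st], true) l := by
        simp only [List.foldl_cons]
        congr 1
        simp only [pvPassF]
        rw [if_pos (by
          simp [List.any_eq_true]
          exact ⟨⟨hc1, hc2⟩, y, hy, hor⟩)]
        simp [PySem.Set.add_of_not_mem hc2]
      have hnd' : (down ++ [st]).Nodup := by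
        simp [List.nodup_append, hnd]
        exact fun b hb hba => hc2 (hba ▸ hb)
      rcases ih (down ++ [st]) true hnd' hl' with ⟨new, g1, g2, g3, g4, g5, g6⟩
      refine ⟨st :: new, ?_, ?_, ?_, ?_, ?_, ?_⟩
      · rw [hstep, g1]; simp
      · simpa using g2
      · intro x hx
        rcases List.mem_cons.1 hx with rfl | hx'
        · exact ⟨by simp, hc1, hc2⟩
        · have h := g3 x hx'
          refine ⟨by simpa using Or.inr (by simpa using h.1), h.2.1,
            fun hxv => h.2.2 (List.mem_append_left _ hxv)⟩
      · rw [hstep, g4]; simp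
      · intro hR x hx
        have hR' : ∀ x ∈ down ++ [st], pvReach sources deps x := by
          intro z hz
          rcases List.mem_append.1 hz with h | h
          · exact hR z h
          · have hz' : z = st := by simpa using h
            subst hz'
            rcases hor with h' | h'
            · exact pvReach.base z ds y hp hc1 hy h'
            · exact pvReach.step z ds y hp hc1 hy (hR y h')
        apply g5 hR'
        have : (down ++ [st]) ++ new = down ++ st :: new := by simp
        rw [this]
        exact hx
      · intro hf
        rw [hstep, g4] at hf
        simp at hf
    · have hstep : List.foldl (pvPassF sources) (down, ch) ((st, ds) :: l) =
          List.foldl (pvPassF sources) (down, ch) l := by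
        simp only [List.foldl_cons]
        congr 1
        simp only [pvPassF]
        rw [if_neg (by
          simp [List.any_eq_true]
          exact fun h1 h2 x hx => ⟨fun hs => hcond ⟨h1, h2, x, hx, Or.inl hs⟩,
            fun hd => hcond ⟨h1, h2, x, hx, Or.inr hd⟩⟩)]
      rcases ih down ch hnd hl' with ⟨new, g1, g2, g3, g4, g5, g6⟩
      refine ⟨new, by rw [hstep]; exact g1, g2, ?_, by rw [hstep]; exact g4, g5, ?_⟩
      · intro x hx
        have h := g3 x hx
        exact ⟨by simpa using Or.inr (by simpa using h.1), h.2.1, h.2.2⟩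
      · intro hf q hq hqs hqe
        rw [hstep] at hf
        rcases List.mem_cons.1 hq with rfl | hq'
        · by_contra hqd
          exact hcond ⟨hqs, hqd, hqe⟩
        · exact g6 hf q hq' hqs hqe

lemma pv_loopB_main (sources : List String) (deps : List (String × List String)) :
    ∀ (fuel : Nat) (down : PySem.Set String), down.Nodup →
      (∀ x ∈ down, x ∈ deps.map Prod.fst) →
      (∀ x ∈ down, pvReach sources deps x) →
      (PySem.Set.ofList (deps.map Prod.fst)).length + 1 ≤ fuel + down.length →
      (pvLoopB sources deps fuel down).Nodup ∧
      (∀ x ∈ pvLoopB sources deps fuel down, pvReach sources deps x) ∧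
      (∀ p ∈ deps, p.1 ∉ sources →
        (∃ y ∈ p.2, y ∈ sources ∨ y ∈ pvLoopB sources deps fuel down) →
        p.1 ∈ pvLoopB sources deps fuel down) := by
  intro fuel
  induction fuel with
  | zero =>
    intro down hnd hkeys hreach hfuel
    exfalso
    have := pv_len_le hnd (fun x hx => (PySem.Set.mem_ofList _ _).2 (hkeys x hx))
    omega
  | succ fuel ih =>
    intro down hnd hkeys hreach hfuel
    rcases pv_pass_spec sources deps deps down false hnd (fun q hq => hq) with
      ⟨new, h1, h2, h3, h4, h5, h6⟩
    have hpass1 : (pvPass sources deps down).1 = down ++ new := h1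
    have hpass2 : (pvPass sources deps down).2 = (false || !new.isEmpty) := h4
    have hpass6 : (pvPass sources deps down).2 = false →
        ∀ p ∈ deps, p.1 ∉ sources → (∃ y ∈ p.2, y ∈ sources ∨ y ∈ down) → p.1 ∈ down := h6
    simp only [pvLoopB]
    by_cases hch : (pvPass sources deps down).2 = true
    · rw [if_pos hch]
      have hne : new ≠ [] := by
        intro h
        rw [hpass2, h] at hch
        simp at hch
      have hlen : 0 < new.length := by
        cases new with
        | nil => exact absurd rfl hne
        | cons _ _ => simp
      rw [hpass1]
      apply ih (down ++ new) h2 ?_ ?_ ?_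
      · intro x hx
        rcases List.mem_append.1 hx with h | h
        · exact hkeys x h
        · exact (h3 x h).1
      · exact h5 hreach
      · simp only [List.length_append]
        omega
    · rw [if_neg hch]
      have hf : (pvPass sources deps down).2 = false := by
        cases hb : (pvPass sources deps down).2
        · rfl
        · exact absurd hb hch
      have hnew : new = [] := by
        rw [hf] at hpass2
        have := hpass2.symm
        simp at this
        simpa using this
      have h1' : (pvPass sources deps down).1 = down := by
        rw [hpass1, hnew]; simp
      rw [h1']
      exact ⟨hnd, hreach, fun q hq hqs hqe => hpass6 hf q hq hqs hqe⟩

lemma pv_closed_complete_B (sources : List String) (deps : List (String × List String))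
    (R : List String)
    (hcl : ∀ p ∈ deps, p.1 ∉ sources → (∃ y ∈ p.2, y ∈ sources ∨ y ∈ R) → p.1 ∈ R) :
    ∀ x, pvReach sources deps x → x ∈ R := by
  intro x h
  induction h with
  | base stage ds y hmem hns hy hsrc => exact hcl (stage, ds) hmem hns ⟨y, hy, Or.inl hsrc⟩
  | step stage ds y hmem hns hy _ ih => exact hcl (stage, ds) hmem hns ⟨y, hy, Or.inr ih⟩

-- ===== VERDICT (by name: the statement is the Claim_ definition above) =====
theorem find_downstream_py_spec : Claim_equal_find_downstream_py := by
  intro sources deps _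
  unfold Spec_find_downstream_py find_downstream_py find_downstream_py_alt
  have hK : (PySem.Set.ofList (deps.map Prod.fst)).length ≤ deps.length := by
    have := PySem.Set.length_ofList_le (deps.map Prod.fst)
    simpa using this
  -- A's BFS result
  have hA := pv_bfsA_main sources deps (sources.length + 2 * deps.length) sources
    PySem.Set.empty (by simp [PySem.Set.empty]) (by simp [PySem.Set.empty])
    (by simp [PySem.Set.empty]) (fun c hc => Or.inl hc)
    (fun c hc => by
      rcases hc with hc | hc
      · exact Or.inl hc
      · simp [PySem.Set.empty] at hc)
    (by simp [PySem.Set.empty]; omega)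
  obtain ⟨hAnd, hAsound, hAclosed⟩ := hA
  -- B's fixpoint result
  have hB := pv_loopB_main sources deps (deps.length + 1) PySem.Set.empty
    (by simp [PySem.Set.empty]) (by simp [PySem.Set.empty]) (by simp [PySem.Set.empty])
    (by simp [PySem.Set.empty]; omega)
  obtain ⟨hBnd, hBsound, hBclosed⟩ := hB
  have hmem : ∀ x, x ∈ pvBfsA (pvDependents deps) sources
      (sources.length + 2 * deps.length) sources PySem.Set.empty ↔
      x ∈ pvLoopB sources deps (deps.length + 1) PySem.Set.empty := by
    intro x
    constructor
    · intro hx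
      exact pv_closed_complete_B sources deps _ hBclosed x (hAsound x hx)
    · intro hx
      exact pv_closed_complete_A sources deps _ hAclosed x (hBsound x hx)
  have hperm : (pvBfsA (pvDependents deps) sources
      (sources.length + 2 * deps.length) sources PySem.Set.empty).Perm
      (pvLoopB sources deps (deps.length + 1) PySem.Set.empty) :=
    (List.perm_ext_iff_of_nodup hAnd hBnd).2 hmem
  exact PySem.List.eq_of_perm_of_pairwise_le_of_injective (fun x => x) (fun a b h => h)
    ((PySem.List.sorted_perm _ _ _).trans (hperm.trans (PySem.List.sorted_perm _ _ _).symm))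
    (PySem.List.sorted_pairwise _ _) (PySem.List.sorted_pairwise _ _)
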